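-- pv_equiv track=rewrite | github.com/diegorobalino16/EjerciciosPython | recursividad_octal.py | esoctal
-- ===== SOURCE A (Python) =====
-- def esoctal(numero):
--     if numero<10:
--         if numero<=7 and numero>=0:
--             return True
--         else:
--             return False
--     else:
--         return esoctal(numero//10)
-- ===== SOURCE B (Python) =====
-- def esoctal(numero):
--     while numero >= 10:
--         numero //= 10
--     return 0 <= numero <= 7
-- ===== Notes on version B (the rewrite author's own statement) =====
-- stated objective: simpler
-- what changed: Replaces the recursive call chain with an iterative while-loop that strips trailing digits down to the leading one, then a single chained range comparison instead of the nested if/else returning literal True/False.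
import Mathlib
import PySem

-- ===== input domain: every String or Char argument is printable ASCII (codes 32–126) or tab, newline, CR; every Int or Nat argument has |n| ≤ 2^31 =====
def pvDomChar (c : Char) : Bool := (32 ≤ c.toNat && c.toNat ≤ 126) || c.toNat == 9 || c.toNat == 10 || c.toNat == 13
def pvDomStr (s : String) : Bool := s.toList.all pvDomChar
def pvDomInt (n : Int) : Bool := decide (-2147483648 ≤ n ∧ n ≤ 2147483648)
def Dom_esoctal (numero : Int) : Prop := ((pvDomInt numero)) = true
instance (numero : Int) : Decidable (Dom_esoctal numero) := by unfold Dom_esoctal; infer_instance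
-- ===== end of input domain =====

-- B replaces the recursion with an iterative leading-digit loop and a single chained range comparison; objective: simpler.

-- ===== PORT A =====
-- Port of A: literal recursion on numero // 10.
def esoctal (numero : Int) : Bool :=
  if numero < 10 then
    if numero ≤ 7 ∧ numero ≥ 0 then true else false
  else esoctal (PySem.Int.floordiv numero 10)
termination_by numero.toNat
decreasing_by
  rw [PySem.Int.floordiv_eq_ediv_of_pos (by omega)]; omega

-- ===== PORT B =====
-- B's while-loop: reduce numero to its leading digit.
def esoctalReduce (numero : Int) : Int :=
  if numero ≥ 10 then esoctalReduce (PySem.Int.floordiv numero 10) else numero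
termination_by numero.toNat
decreasing_by
  rw [PySem.Int.floordiv_eq_ediv_of_pos (by omega)]; omega

-- Port of B: the loop, then one chained comparison.
def esoctal_alt (numero : Int) : Bool :=
  let m := esoctalReduce numero
  decide (0 ≤ m ∧ m ≤ 7)

-- ===== PRECONDITION & SPEC =====
def Spec_esoctal (numero : Int) (out : Bool) : Prop := out = esoctal_alt numero
instance (numero : Int) (out : Bool) : Decidable (Spec_esoctal numero out) := by unfold Spec_esoctal; infer_instance

-- ===== CLAIM (what is proved, stated in full; the proofs are below) =====
def Claim_equal_esoctal : Prop := ∀ (numero : Int), Dom_esoctal numero → Spec_esoctal numero (esoctal numero)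

-- ===== LEMMAS AND PROOFS =====

-- ===== VERDICT (by name: the statement is the Claim_ definition above) =====
theorem esoctal_eq_alt (numero : Int) : esoctal numero = esoctal_alt numero := by
  induction numero using esoctal.induct with
  | case1 n h h7 =>
    rw [esoctal, esoctal_alt, esoctalReduce]
    simp only [if_pos h, if_pos h7, if_neg (by omega : ¬ n ≥ 10)]
    simp; omega
  | case2 n h h7 =>
    rw [esoctal, esoctal_alt, esoctalReduce]
    simp only [if_pos h, if_neg h7, if_neg (by omega : ¬ n ≥ 10)]
    simp; omega
  | case3 n h ih =>
    rw [esoctal, esoctal_alt, esoctalReduce]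
    simp only [if_neg h, if_pos (by omega : n ≥ 10)]
    exact ih

theorem esoctal_spec : Claim_equal_esoctal := by
  intro numero _
  unfold Spec_esoctal
  exact esoctal_eq_alt numero
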